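-- pv_equiv track=rewrite | github.com/rookinc/hyperxi_lab | aether_lab/scripts/export_sector_table.py | shortest_path_tree
-- ===== SOURCE A (Python) =====
-- from collections import deque
--
-- def norm(u, v):
--     return (u, v) if u <= v else (v, u)
--
-- def shortest_path_tree(adj, root):
--     """
--     Canonical BFS tree rooted at `root`.
--     Parent choice is the smallest-labeled predecessor.
--     """
--     dist = {root: 0}
--     parent = {root: None}
--     q = deque([root])
--
--     while q:
--         x = q.popleft()
--         for y in sorted(adj[x]):
--             if y not in dist:
--                 dist[y] = dist[x] + 1
--                 parent[y] = x
--                 q.append(y)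
--             elif dist[y] == dist[x] + 1:
--                 # smaller parent wins for canonical tree
--                 if parent[y] is None or x < parent[y]:
--                     parent[y] = x
--
--     tree_edges = []
--     for y, p in parent.items():
--         if p is not None:
--             tree_edges.append(list(norm(y, p)))
--     tree_edges.sort()
--     return tree_edges
-- ===== SOURCE B (Python) =====
-- from collections import deque
--
-- def norm(u, v):
--     return (u, v) if u <= v else (v, u)
--
-- def shortest_path_tree(adj, root):
--     """
--     Canonical BFS tree rooted at `root`, built in two independent passes:
--     1. a plain BFS that only computes distances;
--     2. an edge scan that gives every non-root reached node its
--        smallest-labeled predecessor on the previous level.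
--     """
--     dist = {root: 0}
--     q = deque([root])
--     while q:
--         x = q.popleft()
--         for y in sorted(adj[x]):
--             if y not in dist:
--                 dist[y] = dist[x] + 1
--                 q.append(y)
--
--     parent = {}
--     for x, d in dist.items():
--         for y in sorted(adj[x]):
--             if dist.get(y) == d + 1 and (y not in parent or x < parent[y]):
--                 parent[y] = x
--
--     return sorted(list(norm(y, p)) for y, p in parent.items())
-- ===== Notes on version B (the rewrite author's own statement) =====
-- stated objective: alternative
-- what changed: B replaces A's single BFS that maintains the parent map inline with three-way branching and tie-break updates by two independent passes: a plain distance-only BFS, then a separate scan over all forward edges that gives every reached non-root node its smallest-labeled predecessor on the previous level.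
import Mathlib
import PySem

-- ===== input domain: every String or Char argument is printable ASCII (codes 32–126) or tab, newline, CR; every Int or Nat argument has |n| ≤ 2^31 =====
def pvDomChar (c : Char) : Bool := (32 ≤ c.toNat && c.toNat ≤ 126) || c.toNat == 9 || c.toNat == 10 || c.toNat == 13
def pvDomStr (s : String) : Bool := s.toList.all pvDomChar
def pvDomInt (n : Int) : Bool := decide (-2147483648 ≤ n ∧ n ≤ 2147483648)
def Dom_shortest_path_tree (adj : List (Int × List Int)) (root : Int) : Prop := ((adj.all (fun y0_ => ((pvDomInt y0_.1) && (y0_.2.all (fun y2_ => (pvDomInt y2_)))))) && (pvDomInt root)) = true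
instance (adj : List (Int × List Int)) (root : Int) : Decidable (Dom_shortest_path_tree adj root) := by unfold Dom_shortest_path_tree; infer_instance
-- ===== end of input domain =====

-- B replaces A's single BFS that maintains the parent map with tie-breaking inline by two
-- independent passes (a plain distance-only BFS, then a predecessor-minimising edge scan);
-- objective: alternative decomposition, same asymptotic cost.

-- helper shared by both Pythons (module-level `norm`)
def pvNorm (u v : Int) : Int × Int := if u ≤ v then (u, v) else (v, u)

-- totality guard for the BFS while-loops: every enqueued node is distinct, and every
-- non-root enqueued node occurs in some adjacency list, so this many pops always suffice.
def pvFuel (adj : List (Int × List Int)) : Nat := 2 + (adj.flatMap (fun p => p.2)).length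

-- ===== PORT A =====
-- body of A's `for y in sorted(adj[x])` loop; state = (dist, parent, q)
def pvStepA (x : Int)
    (st : PySem.Dict Int Int × PySem.Dict Int (Option Int) × List Int) (y : Int) :
    PySem.Dict Int Int × PySem.Dict Int (Option Int) × List Int :=
  if st.1.contains y = false then
    (st.1.insert y (st.1.getD x 0 + 1), st.2.1.insert y (some x), st.2.2 ++ [y])
  else if st.1.getD y 0 = st.1.getD x 0 + 1 then
    -- `if parent[y] is None or x < parent[y]` (y ∈ parent whenever y ∈ dist)
    match st.2.1.getD y none with
    | none => (st.1, st.2.1.insert y (some x), st.2.2)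
    | some p => if x < p then (st.1, st.2.1.insert y (some x), st.2.2) else st
  else st

-- A's `while q:` loop (fuel-guarded; pvFuel pops always suffice)
def pvLoopA (adj : PySem.Dict Int (List Int)) :
    Nat → PySem.Dict Int Int → PySem.Dict Int (Option Int) → List Int →
      PySem.Dict Int Int × PySem.Dict Int (Option Int)
  | 0, dist, parent, _ => (dist, parent)
  | _+1, dist, parent, [] => (dist, parent)
  | f+1, dist, parent, x :: q =>
      let st := (PySem.List.sorted (adj.getD x []) (fun y => y)).foldl (pvStepA x) (dist, parent, q)
      pvLoopA adj f st.1 st.2.1 st.2.2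

def shortest_path_tree (adj : List (Int × List Int)) (root : Int) : List (List Int) :=
  let adjD := PySem.Dict.ofList adj
  let res := pvLoopA adjD (pvFuel adj) ((PySem.Dict.empty).insert root 0)
      ((PySem.Dict.empty).insert root (none : Option Int)) [root]
  let edges := res.2.items.foldl (fun acc yp =>
      match yp.2 with
      | none => acc
      | some p => acc ++ [[(pvNorm yp.1 p).1, (pvNorm yp.1 p).2]]) []
  PySem.List.sorted edges (fun e => e)

-- ===== PORT B =====
-- body of B's phase-1 `for y in sorted(adj[x])` loop; state = (dist, q)
def pvStepB (x : Int) (st : PySem.Dict Int Int × List Int) (y : Int) :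
    PySem.Dict Int Int × List Int :=
  if st.1.contains y = false then (st.1.insert y (st.1.getD x 0 + 1), st.2 ++ [y]) else st

-- B's phase-1 `while q:` loop (distance-only BFS; same fuel guard)
def pvLoopB (adj : PySem.Dict Int (List Int)) :
    Nat → PySem.Dict Int Int → List Int → PySem.Dict Int Int
  | 0, dist, _ => dist
  | _+1, dist, [] => dist
  | f+1, dist, x :: q =>
      let st := (PySem.List.sorted (adj.getD x []) (fun y => y)).foldl (pvStepB x) (dist, q)
      pvLoopB adj f st.1 st.2

-- `if dist.get(y) == d + 1 and (y not in parent or x < parent[y]): parent[y] = x`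
def pvPUpd (D : PySem.Dict Int Int) (x d : Int)
    (parent : PySem.Dict Int Int) (y : Int) : PySem.Dict Int Int :=
  if D.get? y = some (d + 1) then
    match parent.get? y with
    | none => parent.insert y x
    | some p => if x < p then parent.insert y x else parent
  else parent

-- body of B's phase-2 `for x, d in dist.items()` loop
def pvPStep (D : PySem.Dict Int Int) (adj : PySem.Dict Int (List Int))
    (parent : PySem.Dict Int Int) (it : Int × Int) : PySem.Dict Int Int :=
  (PySem.List.sorted (adj.getD it.1 []) (fun y => y)).foldl (pvPUpd D it.1 it.2) parent

def shortest_path_tree_alt (adj : List (Int × List Int)) (root : Int) : List (List Int) :=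
  let adjD := PySem.Dict.ofList adj
  let dist := pvLoopB adjD (pvFuel adj) ((PySem.Dict.empty).insert root 0) [root]
  let parent := dist.items.foldl (pvPStep dist adjD) PySem.Dict.empty
  PySem.List.sorted (parent.items.map (fun yp => [(pvNorm yp.1 yp.2).1, (pvNorm yp.1 yp.2).2]))
    (fun e => e)

-- ===== PRECONDITION & SPEC =====
-- Pre_ is exactly A's domain: A raises KeyError iff some node reachable from root is not a
-- dict key, i.e. iff NO neighbor-closed subset of the keys contains root.
def Pre_shortest_path_tree (adj : List (Int × List Int)) (root : Int) : Prop :=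
  root ∈ (PySem.Dict.ofList adj).keys ∧
  ∃ S ∈ ((PySem.Dict.ofList adj).keys).sublists,
    root ∈ S ∧ ∀ x ∈ S, ∀ y ∈ (PySem.Dict.ofList adj).getD x [], y ∈ S

instance (adj : List (Int × List Int)) (root : Int) : Decidable (Pre_shortest_path_tree adj root) := by
  unfold Pre_shortest_path_tree; infer_instance

def pvWitness_shortest_path_tree : (List (Int × List Int)) × Int := ([(0, [1]), (1, [0, 2]), (2, [])], 0)

def Spec_shortest_path_tree (adj : List (Int × List Int)) (root : Int) (out : List (List Int)) : Prop := out = shortest_path_tree_alt adj root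
instance (adj : List (Int × List Int)) (root : Int) (out : List (List Int)) : Decidable (Spec_shortest_path_tree adj root out) := by unfold Spec_shortest_path_tree; infer_instance

-- ===== CLAIM (what is proved, stated in full; the proofs are below) =====
def Claim_equal_shortest_path_tree : Prop := ∀ (adj : List (Int × List Int)) (root : Int), Dom_shortest_path_tree adj root → Pre_shortest_path_tree adj root → Spec_shortest_path_tree adj root (shortest_path_tree adj root)

-- ===== LEMMAS AND PROOFS =====

-- A's parent dict is always the root entry (root ↦ None) followed by the some-lifted
-- entries of a root-free dict P:
def pvLift (root : Int) (P : PySem.Dict Int Int) : PySem.Dict Int (Option Int) :=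
  PySem.Dict.mk ((root, (none : Option Int)) :: P.items.map (fun p => (p.1, some p.2)))

lemma pv_mk_get?_append {l ext : List (Int × Int)} {k v : Int}
    (h : (PySem.Dict.mk l).get? k = some v) :
    (PySem.Dict.mk (l ++ ext)).get? k = some v := by
  simp only [PySem.Dict.get?, List.find?_append] at *
  rcases h' : l.find? (fun p => p.1 == k) with _ | p
  · rw [h'] at h; simp at h
  · rw [h'] at h; simpa [h'] using h

-- phase-1 inner fold only appends items
lemma pv_stepB_fold_ext (x : Int) (ys : List Int) :
    ∀ st : PySem.Dict Int Int × List Int,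
      ∃ ext, (ys.foldl (pvStepB x) st).1.items = st.1.items ++ ext := by
  induction ys with
  | nil => intro st; exact ⟨[], by simp⟩
  | cons y ys ih =>
    intro st
    obtain ⟨ext, hext⟩ := ih (pvStepB x st y)
    simp only [List.foldl_cons] at *
    unfold pvStepB at hext ⊢
    by_cases hc : st.1.contains y = false
    · rw [if_pos hc] at hext ⊢
      refine ⟨(y, st.1.getD x 0 + 1) :: ext, ?_⟩
      rw [hext, PySem.Dict.items_insert_of_not_contains _ _ hc]; simp
    · rw [if_neg hc] at hext ⊢; exact ⟨ext, hext⟩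

-- phase-1 loop only appends items
lemma pv_loopB_ext (adj : PySem.Dict Int (List Int)) (f : Nat) :
    ∀ (dist : PySem.Dict Int Int) (q : List Int),
      ∃ ext, (pvLoopB adj f dist q).items = dist.items ++ ext := by
  induction f with
  | zero => intro dist q; exact ⟨[], by simp [pvLoopB]⟩
  | succ f ih =>
    intro dist q
    cases q with
    | nil => exact ⟨[], by simp [pvLoopB]⟩
    | cons x q =>
      obtain ⟨e1, he1⟩ := pv_stepB_fold_ext x (PySem.List.sorted (adj.getD x []) (fun y => y)) (dist, q)
      obtain ⟨e2, he2⟩ := ih ((PySem.List.sorted (adj.getD x []) (fun y => y)).foldl (pvStepB x) (dist, q)).1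
        ((PySem.List.sorted (adj.getD x []) (fun y => y)).foldl (pvStepB x) (dist, q)).2
      exact ⟨e1 ++ e2, by simp only [pvLoopB]; rw [he2, he1, List.append_assoc]⟩

lemma pv_lift_contains (root : Int) (P : PySem.Dict Int Int) (y : Int) (hy : y ≠ root) :
    (pvLift root P).contains y = P.contains y := by
  have h0 : (root == y) = false := by simpa using Ne.symm hy
  simp [pvLift, PySem.Dict.contains, List.any_map, Function.comp_def, h0]

lemma pv_lift_insert (root : Int) (P : PySem.Dict Int Int) (y v : Int) (hy : y ≠ root) :
    (pvLift root P).insert y (some v) = pvLift root (P.insert y v) := by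
  by_cases hc : P.contains y = true
  · apply PySem.Dict.ext
    rw [PySem.Dict.items_insert_of_contains _ _ (by rw [pv_lift_contains _ _ _ hy]; exact hc),
        pvLift, pvLift, PySem.Dict.items_insert_of_contains _ _ hc]
    have h0 : ((root : Int) == y) = false := by simpa using Ne.symm hy
    simp only [List.map_cons, List.map_map, h0, Bool.false_eq_true, if_false]
    congr 1
    apply List.map_congr_left
    rintro ⟨a, b⟩ _
    by_cases hp : a = y <;> simp [hp]
  · have hc' : P.contains y = false := by simpa using hc
    apply PySem.Dict.ext
    rw [PySem.Dict.items_insert_of_not_contains _ _ (by rw [pv_lift_contains _ _ _ hy]; exact hc'),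
        pvLift, pvLift, PySem.Dict.items_insert_of_not_contains _ _ hc']
    simp

lemma pv_lift_get?_of_ne (root : Int) (P : PySem.Dict Int Int) (y : Int) (hy : y ≠ root) :
    (pvLift root P).get? y = (P.get? y).map some := by
  have hroot : ((root : Int) == y) = false := by simpa using Ne.symm hy
  simp only [pvLift, PySem.Dict.get?, List.find?_cons, hroot]
  induction P.items with
  | nil => simp
  | cons p l ih =>
    by_cases hp : (p.1 == y) = true
    · simp [hp]
    · have hp' : (p.1 == y) = false := by simpa using hp
      simpa [hp'] using ih

-- the master inner-loop alignment lemma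
lemma pv_inner (D : PySem.Dict Int Int) (root x d : Int) (ys : List Int) :
    ∀ (dist P : PySem.Dict Int Int) (q : List Int),
      dist.get? x = some d →
      dist.get? root = some 0 →
      (∀ k v, dist.get? k = some v → 0 ≤ v) →
      dist.keys.Nodup →
      (∀ y, P.contains y = true ↔ (dist.contains y = true ∧ y ≠ root)) →
      (∃ ext, D.items = (ys.foldl (pvStepB x) (dist, q)).1.items ++ ext) →
      ys.foldl (pvStepA x) (dist, pvLift root P, q)
          = ((ys.foldl (pvStepB x) (dist, q)).1,
             pvLift root (ys.foldl (pvPUpd D x d) P),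
             (ys.foldl (pvStepB x) (dist, q)).2)
      ∧ (∃ news : List (Int × Int),
            (ys.foldl (pvStepB x) (dist, q)).1.items = dist.items ++ news ∧
            (ys.foldl (pvStepB x) (dist, q)).2 = q ++ news.map (·.1) ∧
            ∀ p ∈ news, p.1 ∈ ys)
      ∧ (ys.foldl (pvStepB x) (dist, q)).1.get? root = some 0
      ∧ (∀ k v, (ys.foldl (pvStepB x) (dist, q)).1.get? k = some v → 0 ≤ v)
      ∧ (ys.foldl (pvStepB x) (dist, q)).1.keys.Nodup
      ∧ (∀ y, (ys.foldl (pvPUpd D x d) P).contains y = true ↔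
            ((ys.foldl (pvStepB x) (dist, q)).1.contains y = true ∧ y ≠ root)) := by
  induction ys with
  | nil =>
    intro dist P q hx hroot hnn hnd hP _
    exact ⟨rfl, ⟨[], by simp, by simp, by simp⟩, hroot, hnn, hnd, hP⟩
  | cons y ys ih =>
    intro dist P q hx hroot hnn hnd hP hD
    have hgx : dist.getD x 0 = d := by rw [PySem.Dict.getD, hx]; rfl
    have hd0 : 0 ≤ d := hnn x d hx
    have hcx : dist.contains x = true := by
      rw [PySem.Dict.contains_eq_isSome_get?, hx]; rfl
    have hcroot : dist.contains root = true := by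
      rw [PySem.Dict.contains_eq_isSome_get?, hroot]; rfl
    simp only [List.foldl_cons] at hD ⊢
    by_cases hc : dist.contains y = false
    -- y freshly discovered
    · have hyroot : y ≠ root := fun h => by rw [h, hcroot] at hc; cases hc
      have hyx : y ≠ x := fun h => by rw [h, hcx] at hc; cases hc
      have hB : pvStepB x (dist, q) y = (dist.insert y (d + 1), q ++ [y]) := by
        simp [pvStepB, hc, hgx]
      have hPy : P.get? y = none := by
        rw [PySem.Dict.get?_eq_none_iff_contains]
        by_contra h
        have := (hP y).mp (by simpa using h)
        rw [this.1] at hc; cases hc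
      -- D records the freshly assigned distance
      have hDy : D.get? y = some (d + 1) := by
        obtain ⟨ext, hext⟩ := hD
        rw [hB] at hext
        obtain ⟨e1, he1⟩ := pv_stepB_fold_ext x ys (dist.insert y (d + 1), q ++ [y])
        have hins : (dist.insert y (d + 1)).get? y = some (d + 1) :=
          PySem.Dict.get?_insert_self _ _ _
        have : D.items = (dist.insert y (d + 1)).items ++ (e1 ++ ext) := by
          rw [hext, he1, List.append_assoc]
        calc D.get? y = (PySem.Dict.mk ((dist.insert y (d + 1)).items ++ (e1 ++ ext))).get? y := by
              rw [← this]
          _ = some (d + 1) := pv_mk_get?_append hins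
      have hA : pvStepA x (dist, pvLift root P, q) y
          = (dist.insert y (d + 1), pvLift root (P.insert y x), q ++ [y]) := by
        simp only [pvStepA, hc]
        rw [if_pos trivial, hgx, pv_lift_insert root P y x hyroot]
      have hU : pvPUpd D x d P y = P.insert y x := by
        simp [pvPUpd, hDy, hPy]
      -- re-established invariants for the inserted state
      have hx' : (dist.insert y (d + 1)).get? x = some d := by
        rw [PySem.Dict.get?_insert_of_ne _ _ hyx.symm]; exact hx
      have hroot' : (dist.insert y (d + 1)).get? root = some 0 := by
        rw [PySem.Dict.get?_insert_of_ne _ _ hyroot.symm]; exact hroot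
      have hnn' : ∀ k v, (dist.insert y (d + 1)).get? k = some v → 0 ≤ v := by
        intro k v hk
        rw [PySem.Dict.get?_insert] at hk
        by_cases h : k = y
        · rw [if_pos h] at hk; cases hk; omega
        · rw [if_neg h] at hk; exact hnn k v hk
      have hnd' : (dist.insert y (d + 1)).keys.Nodup := by
        rw [PySem.Dict.keys_insert_of_not_contains _ _ hc]
        have hnm : y ∉ dist.keys := fun h => by
          rw [← PySem.Dict.contains_iff_mem_keys] at h; rw [h] at hc; cases hc
        refine List.nodup_append.mpr ⟨hnd, by simp, ?_⟩
        intro a ha b hb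
        have hby : b = y := by simpa using hb
        subst hby
        exact fun h => hnm (h ▸ ha)
      have hP' : ∀ z, (P.insert y x).contains z = true ↔
          ((dist.insert y (d + 1)).contains z = true ∧ z ≠ root) := by
        intro z
        rw [PySem.Dict.contains_insert, PySem.Dict.contains_insert]
        by_cases h : z = y
        · subst h; simp [hyroot]
        · have : (z == y) = false := by simpa using h
          rw [this]; simpa using hP z
      have hD' : ∃ ext, D.items = (ys.foldl (pvStepB x) (dist.insert y (d + 1), q ++ [y])).1.items ++ ext := by
        rw [hB] at hD; exact hD
      obtain ⟨heq, ⟨news, hni, hnq, hny⟩, h3, h4, h5, h6⟩ :=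
        ih (dist.insert y (d + 1)) (P.insert y x) (q ++ [y]) hx' hroot' hnn' hnd' hP' hD'
      rw [hB, hA, hU]
      refine ⟨heq, ⟨(y, d + 1) :: news, ?_, ?_, ?_⟩, h3, h4, h5, h6⟩
      · rw [hni, PySem.Dict.items_insert_of_not_contains _ _ hc]; simp
      · rw [hnq]; simp
      · intro p hp
        rcases List.mem_cons.mp hp with rfl | hp'
        · simp
        · exact List.mem_cons_of_mem _ (hny p hp')
    -- y already has a distance
    · have hc' : dist.contains y = true := by simpa using hc
      have hB : pvStepB x (dist, q) y = (dist, q) := by simp [pvStepB, hc']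
      obtain ⟨w, hw⟩ : ∃ w, dist.get? y = some w := by
        rw [PySem.Dict.contains_eq_isSome_get?] at hc'
        exact Option.isSome_iff_exists.mp hc'
      have hgy : dist.getD y 0 = w := by rw [PySem.Dict.getD, hw]; rfl
      have hDyw : D.get? y = some w := by
        obtain ⟨ext, hext⟩ := hD
        rw [hB] at hext
        obtain ⟨e1, he1⟩ := pv_stepB_fold_ext x ys (dist, q)
        have : D.items = dist.items ++ (e1 ++ ext) := by rw [hext, he1, List.append_assoc]
        calc D.get? y = (PySem.Dict.mk (dist.items ++ (e1 ++ ext))).get? y := by rw [← this]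
          _ = some w := pv_mk_get?_append hw
      by_cases hwd : w = d + 1
      -- y sits on the next level: candidate-parent update
      · have hyroot : y ≠ root := by
          intro h; rw [h, hroot] at hw
          cases hw; omega
        have hPcy : P.contains y = true := (hP y).mpr ⟨hc', hyroot⟩
        obtain ⟨p, hp⟩ : ∃ p, P.get? y = some p := by
          rw [PySem.Dict.contains_eq_isSome_get?] at hPcy
          exact Option.isSome_iff_exists.mp hPcy
        have hliftread : (pvLift root P).getD y none = some p := by
          rw [PySem.Dict.getD, pv_lift_get?_of_ne root P y hyroot, hp]; rfl
        have hA : pvStepA x (dist, pvLift root P, q) y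
            = if x < p then (dist, pvLift root (P.insert y x), q)
              else (dist, pvLift root P, q) := by
          simp only [pvStepA, hc', Bool.true_eq_false, reduceIte, hgy, hgx, hwd, if_pos,
            hliftread]
          by_cases hxp : x < p
          · rw [if_pos hxp, if_pos hxp, pv_lift_insert root P y x hyroot]
          · rw [if_neg hxp, if_neg hxp]
        have hU : pvPUpd D x d P y
            = if x < p then P.insert y x else P := by
          rw [pvPUpd, if_pos (by rw [hDyw, hwd]), hp]
        have hD' : ∃ ext, D.items = (ys.foldl (pvStepB x) (dist, q)).1.items ++ ext := by
          rw [hB] at hD; exact hD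
        have hPins : ∀ z, (P.insert y x).contains z = true ↔
            (dist.contains z = true ∧ z ≠ root) := by
          intro z
          rw [PySem.Dict.contains_insert]
          by_cases h : z = y
          · subst h; simp [hc', hyroot]
          · have hzz : (z == y) = false := by simpa using h
            rw [hzz]; simpa using hP z
        by_cases hxp : x < p
        · rw [if_pos hxp] at hA hU
          obtain ⟨heq, ⟨news, h1, h2, h3⟩, h4, h5, h6, h7⟩ :=
            ih dist (P.insert y x) q hx hroot hnn hnd hPins hD'
          rw [hB, hA, hU]
          exact ⟨heq, ⟨news, h1, h2, fun p hp => List.mem_cons_of_mem _ (h3 p hp)⟩, h4, h5, h6, h7⟩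
        · rw [if_neg hxp] at hA hU
          obtain ⟨heq, ⟨news, h1, h2, h3⟩, h4, h5, h6, h7⟩ := ih dist P q hx hroot hnn hnd hP hD'
          rw [hB, hA, hU]
          exact ⟨heq, ⟨news, h1, h2, fun p hp => List.mem_cons_of_mem _ (h3 p hp)⟩, h4, h5, h6, h7⟩
      -- y on another level: both sides skip
      · have hA : pvStepA x (dist, pvLift root P, q) y = (dist, pvLift root P, q) := by
          simp only [pvStepA, hc', Bool.true_eq_false, reduceIte, hgy, hgx]
          rw [if_neg (by exact hwd)]
        have hU : pvPUpd D x d P y = P := by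
          rw [pvPUpd, if_neg (by rw [hDyw]; exact fun h => hwd (by injection h))]
        have hD' : ∃ ext, D.items = (ys.foldl (pvStepB x) (dist, q)).1.items ++ ext := by
          rw [hB] at hD; exact hD
        obtain ⟨heq, ⟨news, h1, h2, h3⟩, h4, h5, h6, h7⟩ := ih dist P q hx hroot hnn hnd hP hD'
        rw [hB, hA, hU]
        exact ⟨heq, ⟨news, h1, h2, fun p hp => List.mem_cons_of_mem _ (h3 p hp)⟩, h4, h5, h6, h7⟩

-- a value looked up in the dict built from adj occurs in adj
lemma pv_ofList_items_sub {α : Type} [BEq α] (l : List (α × List Int)) :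
    ∀ (d : PySem.Dict α (List Int)) (p : α × List Int),
      p ∈ (d.update l).items → p ∈ d.items ∨ p ∈ l := by
  induction l with
  | nil => intro d p h; exact Or.inl (by simpa [PySem.Dict.update] using h)
  | cons a l ih =>
    intro d p h
    have : p ∈ (d.insert a.1 a.2).items ∨ p ∈ l := by
      apply ih
      simpa [PySem.Dict.update, List.foldl_cons] using h
    rcases this with h' | h'
    · by_cases hc : d.contains a.1 = true
      · rw [PySem.Dict.items_insert_of_contains _ _ hc] at h'
        obtain ⟨q, hq, hq'⟩ := List.mem_map.mp h'
        by_cases hk : (q.1 == a.1) = true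
        · have hpa : p = (a.1, a.2) := by rw [← hq']; simp [hk]
          rw [hpa]; exact Or.inr (List.mem_cons_self)
        · left; rw [← hq']; simpa [hk] using hq
      · rw [PySem.Dict.items_insert_of_not_contains _ _ (by simpa using hc)] at h'
        rcases List.mem_append.mp h' with h'' | h''
        · exact Or.inl h''
        · have hpa : p = (a.1, a.2) := by simpa using h''
          rw [hpa]; exact Or.inr (List.mem_cons_self)
    · exact Or.inr (List.mem_cons_of_mem _ h')

lemma pv_ofList_getD_sub (adj : List (Int × List Int)) (x y : Int)
    (h : y ∈ (PySem.Dict.ofList adj).getD x []) : y ∈ adj.flatMap (fun p => p.2) := by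
  rcases hg : (PySem.Dict.ofList adj).get? x with _ | l
  · simp [PySem.Dict.getD, hg] at h
  · have hmem := PySem.Dict.mem_items_of_get?_eq_some _ hg
    have := pv_ofList_items_sub adj PySem.Dict.empty (x, l) (by simpa [PySem.Dict.ofList] using hmem)
    rcases this with h' | h'
    · simp [PySem.Dict.empty] at h'
    · rw [PySem.Dict.getD, hg] at h
      exact List.mem_flatMap.mpr ⟨(x, l), h', by simpa using h⟩

-- a nodup list of keys drawn from a fixed pool is no longer than the pool
lemma pv_nodup_subset_length {l m : List Int} (h : l.Nodup) (hs : l ⊆ m) :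
    l.length ≤ m.length := by
  classical
  calc l.length = l.toFinset.card := (List.toFinset_card_of_nodup h).symm
  _ ≤ m.toFinset.card := Finset.card_le_card (by
        intro a ha; rw [List.mem_toFinset] at *; exact hs ha)
  _ ≤ m.length := m.toFinset_card_le

-- the outer alignment: from any aligned mid-BFS state, A's final parent dict is the lift of
-- B's phase-2 fold over the not-yet-popped suffix of the final distance dict's items
lemma pv_outer (adj : List (Int × List Int)) (root : Int) (f : Nat) :
    ∀ (dist P : PySem.Dict Int Int) (q : List Int) (pre distQ : List (Int × Int)),
      dist.items = pre ++ distQ →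
      q = distQ.map (fun p => p.1) →
      dist.get? root = some 0 →
      (∀ k v, dist.get? k = some v → 0 ≤ v) →
      dist.keys.Nodup →
      (∀ y, P.contains y = true ↔ (dist.contains y = true ∧ y ≠ root)) →
      dist.keys ⊆ root :: adj.flatMap (fun p => p.2) →
      q.length + (root :: adj.flatMap (fun p => p.2)).length ≤ f + dist.size →
      (pvLoopA (PySem.Dict.ofList adj) f dist (pvLift root P) q).2
        = pvLift root
            (((pvLoopB (PySem.Dict.ofList adj) f dist q).items.drop pre.length).foldl
              (pvPStep (pvLoopB (PySem.Dict.ofList adj) f dist q) (PySem.Dict.ofList adj)) P) := by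
  induction f with
  | zero =>
    intro dist P q pre distQ hitems hq hroot hnn hnd hP hsub hfuel
    have hsz : dist.size = dist.keys.length := by
      simp [PySem.Dict.keys, PySem.Dict.size]
    have hsize : dist.size ≤ (root :: adj.flatMap (fun p => p.2)).length := by
      rw [hsz]; exact pv_nodup_subset_length hnd hsub
    have hq0 : q = [] := List.eq_nil_of_length_eq_zero (by omega)
    subst hq0
    have hdq : distQ = [] := by
      cases distQ with
      | nil => rfl
      | cons a l => simp at hq
    subst hdq
    show pvLift root P = _
    rw [show pvLoopB (PySem.Dict.ofList adj) 0 dist [] = dist from rfl, hitems]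
    simp
  | succ f ih =>
    intro dist P q pre distQ hitems hq hroot hnn hnd hP hsub hfuel
    cases q with
    | nil =>
      have hdq : distQ = [] := by
        cases distQ with
        | nil => rfl
        | cons a l => simp at hq
      subst hdq
      show pvLift root P = _
      rw [show pvLoopB (PySem.Dict.ofList adj) (f+1) dist [] = dist from rfl, hitems]
      simp
    | cons x q' =>
      cases distQ with
      | nil => simp at hq
      | cons xd distQ' =>
        rw [List.map_cons] at hq
        have hx1 : xd.1 = x := (List.cons.injEq _ _ _ _ ▸ hq).1.symm
        have hq' : q' = distQ'.map (fun p => p.1) := (List.cons.injEq _ _ _ _ ▸ hq).2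
        have hxval : dist.get? x = some xd.2 := by
          apply PySem.Dict.get?_of_mem_items _ _ hnd
          rw [hitems, ← hx1]
          exact List.mem_append_right _ (by simp)
        have hd0 : 0 ≤ xd.2 := hnn x xd.2 hxval
        -- one step of both loops
        have hstepA : pvLoopA (PySem.Dict.ofList adj) (f+1) dist (pvLift root P) (x :: q')
            = pvLoopA (PySem.Dict.ofList adj) f
                (((PySem.List.sorted ((PySem.Dict.ofList adj).getD x []) (fun y => y)).foldl (pvStepA x) (dist, pvLift root P, q'))).1
                (((PySem.List.sorted ((PySem.Dict.ofList adj).getD x []) (fun y => y)).foldl (pvStepA x) (dist, pvLift root P, q'))).2.1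
                (((PySem.List.sorted ((PySem.Dict.ofList adj).getD x []) (fun y => y)).foldl (pvStepA x) (dist, pvLift root P, q'))).2.2 := rfl
        have hstepB : pvLoopB (PySem.Dict.ofList adj) (f+1) dist (x :: q')
            = pvLoopB (PySem.Dict.ofList adj) f
                (((PySem.List.sorted ((PySem.Dict.ofList adj).getD x []) (fun y => y)).foldl (pvStepB x) (dist, q'))).1
                (((PySem.List.sorted ((PySem.Dict.ofList adj).getD x []) (fun y => y)).foldl (pvStepB x) (dist, q'))).2 := rfl
        set ys := PySem.List.sorted ((PySem.Dict.ofList adj).getD x []) (fun y => y) with hys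
        set stB := ys.foldl (pvStepB x) (dist, q') with hstB
        set D := pvLoopB (PySem.Dict.ofList adj) f stB.1 stB.2 with hD
        have hDext : ∃ ext, D.items = stB.1.items ++ ext :=
          pv_loopB_ext (PySem.Dict.ofList adj) f stB.1 stB.2
        obtain ⟨heq, ⟨news, hni, hnq, hny⟩, h3, h4, h5, h6⟩ :=
          pv_inner D root x xd.2 ys dist P q' hxval hroot hnn hnd hP hDext
        rw [← hstB] at heq hni hnq h3 h4 h5 h6
        -- invariants for the recursive call
        have hkeys' : stB.1.keys = dist.keys ++ news.map (fun p => p.1) := by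
          simp [PySem.Dict.keys, hni]
        have hsub' : stB.1.keys ⊆ root :: adj.flatMap (fun p => p.2) := by
          rw [hkeys']
          intro a ha
          rcases List.mem_append.mp ha with h | h
          · exact hsub h
          · obtain ⟨p, hp, hpa⟩ := List.mem_map.mp h
            have hpy : p.1 ∈ ys := hny p hp
            have : p.1 ∈ (PySem.Dict.ofList adj).getD x [] := by
              rw [hys] at hpy
              exact (PySem.List.mem_sorted _ _ _ _).mp hpy
            exact hpa ▸ List.mem_cons_of_mem _ (pv_ofList_getD_sub adj x p.1 this)
        have hsz : ∀ dd : PySem.Dict Int Int, dd.size = dd.items.length := by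
          intro dd; simp [PySem.Dict.size]
        have hfuel' : stB.2.length + (root :: adj.flatMap (fun p => p.2)).length
            ≤ f + stB.1.size := by
          have e1 : stB.2.length = q'.length + news.length := by rw [hnq]; simp
          have e2 : stB.1.size = dist.size + news.length := by
            rw [hsz, hsz, hni]; simp
          have e3 : (x :: q').length = q'.length + 1 := by simp
          rw [e1, e2]
          rw [e3] at hfuel
          omega
        have hrec := ih stB.1 (ys.foldl (pvPUpd D x xd.2) P) stB.2 (pre ++ [xd]) (distQ' ++ news)
          (by rw [hni, hitems]; simp) (by rw [hnq, hq']; simp) h3 h4 h5 h6 hsub' hfuel'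
        -- assemble
        rw [hstepA, heq]
        rw [show (stB.1, pvLift root (ys.foldl (pvPUpd D x xd.2) P), stB.2).1 = stB.1 from rfl]
        rw [show (stB.1, pvLift root (ys.foldl (pvPUpd D x xd.2) P), stB.2).2.1
              = pvLift root (ys.foldl (pvPUpd D x xd.2) P) from rfl]
        rw [show (stB.1, pvLift root (ys.foldl (pvPUpd D x xd.2) P), stB.2).2.2 = stB.2 from rfl]
        rw [hstepB]
        rw [← hD] at hrec
        rw [hrec]
        congr 1
        -- the two phase-2 folds agree: peeling the head item xd off the suffix
        obtain ⟨ext, hext⟩ := hDext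
        have hDitems : D.items = pre ++ xd :: (distQ' ++ news ++ ext) := by
          rw [hext, hni, hitems]; simp
        have hdrop1 : D.items.drop pre.length = xd :: (distQ' ++ news ++ ext) := by
          rw [hDitems, List.drop_left]
        have hdrop2 : D.items.drop (pre ++ [xd]).length = distQ' ++ news ++ ext := by
          rw [hDitems, show pre ++ xd :: (distQ' ++ news ++ ext)
                = (pre ++ [xd]) ++ (distQ' ++ news ++ ext) by simp, List.drop_left]
        rw [hdrop1, hdrop2, List.foldl_cons]
        congr 1
        rw [pvPStep, hx1]
-- assembling the edge list: A's filtering fold over the lifted items is B's map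
lemma pv_edges (root : Int) (l : List (Int × Int)) :
    ∀ acc : List (List Int),
      (((root, (none : Option Int)) :: l.map (fun p => (p.1, some p.2))).foldl (fun acc yp =>
          match yp.2 with
          | none => acc
          | some p => acc ++ [[(pvNorm yp.1 p).1, (pvNorm yp.1 p).2]]) acc)
        = acc ++ l.map (fun yp => [(pvNorm yp.1 yp.2).1, (pvNorm yp.1 yp.2).2]) := by
  have key : ∀ (m : List (Int × Int)) (acc : List (List Int)),
      ((m.map (fun p => (p.1, some p.2))).foldl (fun acc yp =>
          match yp.2 with
          | none => acc
          | some p => acc ++ [[(pvNorm yp.1 p).1, (pvNorm yp.1 p).2]]) acc)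
        = acc ++ m.map (fun yp => [(pvNorm yp.1 yp.2).1, (pvNorm yp.1 yp.2).2]) := by
    intro m
    induction m with
    | nil => intro acc; simp
    | cons p m ih => intro acc; simp [ih]
  intro acc
  simpa using key l acc

-- packaging A's filtering fold of the lifted parent dict as B's map
lemma pv_assemble (root : Int) (P : PySem.Dict Int Int) :
    PySem.List.sorted ((pvLift root P).items.foldl (fun acc yp => match yp.2 with | none => acc | some p => acc ++ [[(pvNorm yp.1 p).1, (pvNorm yp.1 p).2]]) []) (fun e => e)
      = PySem.List.sorted (P.items.map (fun yp => [(pvNorm yp.1 yp.2).1, (pvNorm yp.1 yp.2).2])) (fun e => e) := by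
  rw [show (pvLift root P).items
      = (root, (none : Option Int)) :: P.items.map (fun p => (p.1, some p.2)) from rfl]
  rw [pv_edges]
  simp

-- ===== VERDICT (by name: the statement is the Claim_ definition above) =====
theorem shortest_path_tree_spec : Claim_equal_shortest_path_tree := by
  intro adj root _ _
  unfold Spec_shortest_path_tree
  have hpar0 : (PySem.Dict.empty).insert root (none : Option Int) = pvLift root PySem.Dict.empty := by
    apply PySem.Dict.ext
    rw [PySem.Dict.items_insert_of_not_contains _ _ (by simp [PySem.Dict.contains, PySem.Dict.empty])]
    simp [pvLift, PySem.Dict.empty]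
  have hd0items : ((PySem.Dict.empty).insert root (0 : Int)).items = [] ++ [(root, 0)] := by
    rw [PySem.Dict.items_insert_of_not_contains _ _ (by simp [PySem.Dict.contains, PySem.Dict.empty])]
    simp [PySem.Dict.empty]
  have hd0get : ∀ k : Int, ((PySem.Dict.empty).insert root (0 : Int)).get? k
      = if k = root then some 0 else none := by
    intro k
    rw [PySem.Dict.get?_insert]
    by_cases h : k = root <;> simp [h, PySem.Dict.get?, PySem.Dict.empty]
  have hnn0 : ∀ k v : Int, ((PySem.Dict.empty).insert root (0 : Int)).get? k = some v → 0 ≤ v := by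
    intro k v hk
    rw [hd0get] at hk
    by_cases h : k = root
    · rw [if_pos h] at hk; cases hk; omega
    · rw [if_neg h] at hk; cases hk
  have hP0 : ∀ y : Int, (PySem.Dict.empty : PySem.Dict Int Int).contains y = true ↔
      (((PySem.Dict.empty).insert root (0 : Int)).contains y = true ∧ y ≠ root) := by
    intro y
    constructor
    · intro h; simp [PySem.Dict.contains, PySem.Dict.empty] at h
    · rintro ⟨hc, hne⟩
      rw [PySem.Dict.contains_eq_isSome_get?, hd0get, if_neg hne] at hc
      cases hc
  have key := pv_outer adj root (pvFuel adj) ((PySem.Dict.empty).insert root 0)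
      PySem.Dict.empty [root] [] [(root, 0)]
      hd0items (by simp)
      (by rw [hd0get]; simp)
      hnn0
      (by rw [PySem.Dict.keys, hd0items]; simp)
      hP0
      (by rw [PySem.Dict.keys, hd0items]; intro a ha; simp at ha; simp [ha])
      (by rw [PySem.Dict.size, hd0items]; simp [pvFuel]; omega)
  rw [← hpar0] at key
  simp only [List.length_nil, List.drop_zero] at key
  have hA : shortest_path_tree adj root
      = PySem.List.sorted (((pvLoopA (PySem.Dict.ofList adj) (pvFuel adj) ((PySem.Dict.empty).insert root 0) ((PySem.Dict.empty).insert root (none : Option Int)) [root]).2).items.foldl (fun acc yp => match yp.2 with | none => acc | some p => acc ++ [[(pvNorm yp.1 p).1, (pvNorm yp.1 p).2]]) []) (fun e => e) := rfl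
  have hB : shortest_path_tree_alt adj root
      = PySem.List.sorted (((pvLoopB (PySem.Dict.ofList adj) (pvFuel adj) ((PySem.Dict.empty).insert root 0) [root]).items.foldl (pvPStep (pvLoopB (PySem.Dict.ofList adj) (pvFuel adj) ((PySem.Dict.empty).insert root 0) [root]) (PySem.Dict.ofList adj)) PySem.Dict.empty).items.map (fun yp => [(pvNorm yp.1 yp.2).1, (pvNorm yp.1 yp.2).2])) (fun e => e) := rfl
  rw [hA, hB, key, pv_assemble]
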